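-- pv_equiv track=rewrite | github.com/jhoisz/Algoritmos-de-Escalonamento-do-Braco-do-Disco | elevador.py | elevador
-- ===== SOURCE A (Python) =====
-- def elevador(posInicial, lim, posicoes):
--     # cria cópia das posicoes no disco de forma ordenada
--     pos = posicoes.copy()
--     pos.sort()
--     # variavel para guardar movimentacoes no algoritmo do elevador
--     elevador = 0
--     # variavel temporaria que inicia com a posicao onde a cabeça do disco está posicionada
--     tmp = posInicial
--
--     # lista para percorrer outro direcao de requisicoes
--     posDir2 = []
--
--     # Para cada posicao na lista de posicoes
--     for p in pos:
--         # verifica se esta dentro do limite da lista, e se é maior que a posicao anterior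
--         if p < lim and p > tmp:
--             # incrementa ena variavel elevador a quantidade de movimentacoes
--             elevador+= abs(p-tmp)
--             # a variavel temporaria passa a ser a variavel da posicao atual
--             tmp = p
--         else:
--             # caso contrario, incrementa na lista de posicoes que estao na outra direcao do braco do disco
--             posDir2.append(p)
--
--     # ordena a lista de posicoes na outra direcao do braco do disco de forma reversa, decrescente
--     posDir2.sort(reverse=True)
--     # realiza as mesma operacoes para contar os movimentos
--     for p in posDir2:
--         elevador+= abs(p-tmp)
--         tmp = p
--
--     return "ELEVADOR "+str(elevador)
-- ===== SOURCE B (Python) =====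
-- def elevador(posInicial, lim, posicoes):
--     # Only the extremes matter: sweep up to the largest request inside the
--     # window, then jump to the far side and sweep down to its smallest request.
--     up = [p for p in posicoes if posInicial < p < lim]
--     rest = [p for p in posicoes if not (posInicial < p < lim)]
--     tmp = max(up, default=posInicial)
--     total = tmp - posInicial
--     if rest:
--         total += abs(max(rest) - tmp) + (max(rest) - min(rest))
--     return "ELEVADOR " + str(total)
-- ===== Notes on version B (the rewrite author's own statement) =====
-- stated objective: faster
-- what changed: B replaces A's sort + ascending scan + second descending sort/scan by a single partition into in-window and other-direction requests plus min/max reductions, exploiting that the telescoping movement sums depend only on the extremes.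
-- intended difference: On inputs with a duplicated request strictly between posInicial and lim that is smaller than every other-direction request (or, with no other-direction requests, smaller than the largest in-window request), A's strict 'p > tmp' test makes the head sweep back down to re-serve the duplicate and A returns the larger count (e.g. 'ELEVADOR 7' on (0,10,[3,3,5])); B returns the intended SCAN count ('ELEVADOR 5'): a request at an already-visited position costs no extra movement. — e.g. on elevador(0, 10, [3, 3, 5]): A returns "ELEVADOR 7", B returns "ELEVADOR 5"
import Mathlib
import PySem

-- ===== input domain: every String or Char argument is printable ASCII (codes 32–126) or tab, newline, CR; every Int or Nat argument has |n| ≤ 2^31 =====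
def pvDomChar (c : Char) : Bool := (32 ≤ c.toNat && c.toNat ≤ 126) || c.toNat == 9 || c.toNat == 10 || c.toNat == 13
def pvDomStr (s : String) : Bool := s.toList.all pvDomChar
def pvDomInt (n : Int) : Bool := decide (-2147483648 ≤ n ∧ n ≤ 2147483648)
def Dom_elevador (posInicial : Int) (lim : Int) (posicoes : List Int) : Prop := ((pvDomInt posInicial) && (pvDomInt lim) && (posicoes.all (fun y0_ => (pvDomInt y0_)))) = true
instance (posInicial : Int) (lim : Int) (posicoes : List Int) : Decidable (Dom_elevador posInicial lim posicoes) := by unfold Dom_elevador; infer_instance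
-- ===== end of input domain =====

-- B replaces A's sort + two scans by one partition plus min/max reductions (O(n) instead of O(n log n));
-- on duplicated in-window requests below all other-direction requests, A sweeps back to re-serve the
-- duplicate (stated as the intended difference D_ below), B counts the natural SCAN movement.

-- ===== PORT A =====
def elevador (posInicial : Int) (lim : Int) (posicoes : List Int) : String :=
  let pos := PySem.List.sorted posicoes (fun x => x)
  let r := pos.foldl (fun (st : Int × Int × List Int) p =>
      if p < lim ∧ st.2.1 < p then (st.1 + |p - st.2.1|, p, st.2.2)
      else (st.1, st.2.1, st.2.2 ++ [p])) (0, posInicial, ([] : List Int))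
  let posDir2 := PySem.List.sorted r.2.2 (fun x => x) true
  let f := posDir2.foldl (fun (st : Int × Int) p => (st.1 + |p - st.2|, p)) (r.1, r.2.1)
  "ELEVADOR " ++ PySem.Int.toStr f.1

-- ===== PORT B =====
def elevador_alt (posInicial : Int) (lim : Int) (posicoes : List Int) : String :=
  let up := posicoes.filter (fun p => decide (posInicial < p) && decide (p < lim))
  let rest := posicoes.filter (fun p => !(decide (posInicial < p) && decide (p < lim)))
  let tmp := match PySem.List.max? up (fun y => y) with | none => posInicial | some m => m
  let total := tmp - posInicial
  let total := match PySem.List.max? rest (fun y => y), PySem.List.min? rest (fun y => y) with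
    | some M, some m => total + (|M - tmp| + (M - m))
    | _, _ => total
  "ELEVADOR " ++ PySem.Int.toStr total

-- ===== PRECONDITION & SPEC =====
-- On inputs with a duplicated request strictly between posInicial and lim that is smaller than every
-- other-direction request (or, with none of those, smaller than the largest in-window request), A's
-- strict 'p > tmp' test makes the head sweep back down to re-serve the duplicate and A returns the
-- larger count; B returns the intended SCAN count: a request at an already-visited position costs nothing.
def D_elevador (posInicial : Int) (lim : Int) (posicoes : List Int) : Prop :=
  ∃ v ∈ posicoes, posInicial < v ∧ v < lim ∧ 2 ≤ posicoes.count v ∧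
    (∀ e ∈ posicoes, (posInicial < e ∧ e < lim) ∨ v < e) ∧
    ((∃ e ∈ posicoes, ¬(posInicial < e ∧ e < lim)) ∨ (∃ w ∈ posicoes, posInicial < w ∧ w < lim ∧ v < w))
instance (posInicial : Int) (lim : Int) (posicoes : List Int) : Decidable (D_elevador posInicial lim posicoes) := by
  unfold D_elevador; infer_instance

def Spec_elevador (posInicial : Int) (lim : Int) (posicoes : List Int) (out : String) : Prop :=
  ¬ D_elevador posInicial lim posicoes → out = elevador_alt posInicial lim posicoes
instance (posInicial : Int) (lim : Int) (posicoes : List Int) (out : String) : Decidable (Spec_elevador posInicial lim posicoes out) := by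
  unfold Spec_elevador; infer_instance

def pvDiffWitness_elevador : Int × Int × List Int := (0, 10, [3, 3, 5])
def pvDiffWitnessOut_elevador : String × String := ("ELEVADOR 7", "ELEVADOR 5")

-- ===== CLAIM (what is proved, stated in full; the proofs are below) =====
def Claim_unchanged_elevador : Prop := ∀ (posInicial : Int) (lim : Int) (posicoes : List Int), Dom_elevador posInicial lim posicoes → Spec_elevador posInicial lim posicoes (elevador posInicial lim posicoes)
def Claim_exact_elevador : Prop := ∀ (posInicial : Int) (lim : Int) (posicoes : List Int), Dom_elevador posInicial lim posicoes → D_elevador posInicial lim posicoes → elevador posInicial lim posicoes ≠ elevador_alt posInicial lim posicoes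
def Claim_changed_elevador : Prop := Dom_elevador (pvDiffWitness_elevador.1) (pvDiffWitness_elevador.2.1) (pvDiffWitness_elevador.2.2) ∧ D_elevador (pvDiffWitness_elevador.1) (pvDiffWitness_elevador.2.1) (pvDiffWitness_elevador.2.2) ∧ elevador (pvDiffWitness_elevador.1) (pvDiffWitness_elevador.2.1) (pvDiffWitness_elevador.2.2) = pvDiffWitnessOut_elevador.1 ∧ elevador_alt (pvDiffWitness_elevador.1) (pvDiffWitness_elevador.2.1) (pvDiffWitness_elevador.2.2) = pvDiffWitnessOut_elevador.2 ∧ pvDiffWitnessOut_elevador.1 ≠ pvDiffWitnessOut_elevador.2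

-- ===== LEMMAS AND PROOFS =====

-- final tmp of A's first loop
def gT (lim : Int) : List Int → Int → Int
  | [], t => t
  | p :: s, t => if p < lim ∧ t < p then gT lim s p else gT lim s t

-- rejected list (posDir2) of A's first loop
def gD (lim : Int) : List Int → Int → List Int
  | [], _ => []
  | p :: s, t => if p < lim ∧ t < p then gD lim s p else p :: gD lim s t

theorem splitA (lim : Int) (s : List Int) (e t : Int) (d : List Int) :
    s.foldl (fun (st : Int × Int × List Int) p =>
      if p < lim ∧ st.2.1 < p then (st.1 + |p - st.2.1|, p, st.2.2)
      else (st.1, st.2.1, st.2.2 ++ [p])) (e, t, d)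
    = (e + (gT lim s t - t), gT lim s t, d ++ gD lim s t) := by
  induction s generalizing e t d with
  | nil => simp [gT, gD]
  | cons p s ih =>
    by_cases h : p < lim ∧ t < p
    · have habs : |p - t| = p - t := abs_of_nonneg (by omega)
      simp only [List.foldl_cons, gT, gD, if_pos h]
      rw [ih]
      refine Prod.ext ?_ (Prod.ext rfl rfl)
      simp only []
      rw [habs]; ring
    · simp only [List.foldl_cons, gT, gD, if_neg h]
      rw [ih]
      simp

theorem gT_ge (lim : Int) (s : List Int) (t : Int) : t ≤ gT lim s t := by
  induction s generalizing t with
  | nil => simp [gT]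
  | cons p s ih =>
    by_cases h : p < lim ∧ t < p
    · simp only [gT, if_pos h]; have := ih p; omega
    · simp only [gT, if_neg h]; exact ih t

theorem gT_cases (lim : Int) (s : List Int) (t : Int) :
    gT lim s t = t ∨ (gT lim s t ∈ s ∧ t < gT lim s t ∧ gT lim s t < lim) := by
  induction s generalizing t with
  | nil => simp [gT]
  | cons p s ih =>
    by_cases h : p < lim ∧ t < p
    · simp only [gT, if_pos h]
      rcases ih p with h1 | ⟨h1, h2, h3⟩
      · right; rw [h1]; exact ⟨List.mem_cons_self, h.2, h.1⟩
      · right; exact ⟨List.mem_cons_of_mem _ h1, by omega, h3⟩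
    · simp only [gT, if_neg h]
      rcases ih t with h1 | ⟨h1, h2, h3⟩
      · left; exact h1
      · right; exact ⟨List.mem_cons_of_mem _ h1, h2, h3⟩

theorem gT_ub (lim : Int) (s : List Int) :
    ∀ (t v : Int), v ∈ s → t < v → v < lim → v ≤ gT lim s t := by
  induction s with
  | nil => intro t v hv _ _; simp at hv
  | cons p s ih =>
    intro t v hv h1 h2
    rcases List.mem_cons.mp hv with rfl | hv'
    · have hc : v < lim ∧ t < v := ⟨h2, h1⟩
      simp only [gT, if_pos hc]
      exact gT_ge lim s v
    · by_cases h : p < lim ∧ t < p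
      · simp only [gT, if_pos h]
        by_cases hvp : p < v
        · exact ih p v hv' hvp h2
        · have := gT_ge lim s p; omega
      · simp only [gT, if_neg h]; exact ih t v hv' h1 h2

theorem gD_sublist (lim : Int) (s : List Int) (t : Int) : (gD lim s t).Sublist s := by
  induction s generalizing t with
  | nil => simp [gD]
  | cons p s ih =>
    by_cases h : p < lim ∧ t < p
    · simp only [gD, if_pos h]; exact (ih p).cons _
    · simp only [gD, if_neg h]; exact (ih t).cons₂ _

theorem gD_mem (lim : Int) (s : List Int) (hs : s.Pairwise (· ≤ ·)) (t v : Int) :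
    v ∈ gD lim s t ↔ v ∈ s ∧ (v ≤ t ∨ lim ≤ v ∨ 2 ≤ s.count v) := by
  induction s generalizing t with
  | nil => simp [gD]
  | cons p s ih =>
    rw [List.pairwise_cons] at hs
    obtain ⟨hple, hs'⟩ := hs
    by_cases h : p < lim ∧ t < p
    · obtain ⟨hlim, htp⟩ := h
      simp only [gD, if_pos (And.intro hlim htp)]
      rw [ih hs' p]
      by_cases hvp : v = p
      · subst hvp
        have hc : v ∈ s ↔ 1 ≤ s.count v := by
          rw [← List.count_pos_iff]; omega
        constructor
        · rintro ⟨hm, _⟩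
          refine ⟨List.mem_cons_self, Or.inr (Or.inr ?_)⟩
          rw [List.count_cons_self]
          have h1 := hc.mp hm
          omega
        · rintro ⟨_, hcond⟩
          rcases hcond with h1 | h1 | h1
          · omega
          · omega
          · rw [List.count_cons_self] at h1
            exact ⟨hc.mpr (by omega), Or.inl le_rfl⟩
      · have hcnt : (p :: s).count v = s.count v := List.count_cons_of_ne (Ne.symm hvp)
        constructor
        · rintro ⟨hm, hcond⟩
          have hpv : p ≤ v := hple v hm
          refine ⟨List.mem_cons_of_mem _ hm, ?_⟩
          rcases hcond with h1 | h1 | h1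
          · omega
          · exact Or.inr (Or.inl h1)
          · rw [hcnt]; exact Or.inr (Or.inr h1)
        · rintro ⟨hm, hcond⟩
          rcases List.mem_cons.mp hm with rfl | hm'
          · exact absurd rfl hvp
          · have hpv : p ≤ v := hple v hm'
            refine ⟨hm', ?_⟩
            rcases hcond with h1 | h1 | h1
            · omega
            · exact Or.inr (Or.inl h1)
            · rw [hcnt] at h1; exact Or.inr (Or.inr h1)
    · simp only [gD, if_neg h, List.mem_cons]
      rw [ih hs' t]
      by_cases hvp : v = p
      · subst hvp
        simp only [true_or, true_iff]
        refine ⟨trivial, ?_⟩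
        rw [not_and_or, not_lt, not_lt] at h
        rcases h with h | h
        · exact Or.inr (Or.inl h)
        · exact Or.inl h
      · have hcnt : (p :: s).count v = s.count v := List.count_cons_of_ne (Ne.symm hvp)
        constructor
        · rintro (h' | h')
          · exact absurd h' hvp
          · obtain ⟨hm, hcond⟩ := h'
            refine ⟨Or.inr hm, ?_⟩
            rw [hcnt]
            exact hcond
        · rintro ⟨hm, hcond⟩
          rcases hm with rfl | hm'
          · exact absurd rfl hvp
          · right
            rw [hcnt] at hcond
            exact ⟨hm', hcond⟩

theorem descFold (x : Int) (xs : List Int) (e t : Int)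
    (h : (x :: xs).Pairwise (fun a b => b ≤ a)) :
    ((x :: xs).foldl (fun (st : Int × Int) p => (st.1 + |p - st.2|, p)) (e, t)).1
    = e + |x - t| + (x - (x :: xs).getLast (List.cons_ne_nil x xs)) := by
  induction xs generalizing x e t with
  | nil => simp
  | cons y ys ih =>
    rw [List.pairwise_cons] at h
    obtain ⟨hle, h'⟩ := h
    have hyx : y ≤ x := hle y List.mem_cons_self
    have habs : |y - x| = x - y := by rw [abs_sub_comm]; exact abs_of_nonneg (by omega)
    simp only [List.foldl_cons]
    rw [List.getLast_cons (List.cons_ne_nil y ys)]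
    have := ih y (e + |x - t|) x h'
    simp only [List.foldl_cons] at this
    rw [this, habs]
    omega

theorem descLast_le (x : Int) (xs : List Int)
    (h : (x :: xs).Pairwise (fun a b => b ≤ a)) :
    ∀ v ∈ x :: xs, (x :: xs).getLast (List.cons_ne_nil x xs) ≤ v := by
  induction xs generalizing x with
  | nil => intro v hv; simp at hv; simp [hv]
  | cons y ys ih =>
    rw [List.pairwise_cons] at h
    obtain ⟨hle, h'⟩ := h
    rw [List.getLast_cons (List.cons_ne_nil y ys)]
    intro v hv
    rcases List.mem_cons.mp hv with rfl | hv'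
    · have h1 := ih y h' y List.mem_cons_self
      have h2 := hle y List.mem_cons_self
      omega
    · exact ih y h' v hv'

-- A's final tmp is B's tmp: max of the in-window requests, defaulting to posInicial
theorem gT_eq_max (t0 lim : Int) (l : List Int) :
    gT lim (PySem.List.sorted l (fun x => x)) t0
    = match PySem.List.max? (l.filter (fun p => decide (t0 < p) && decide (p < lim))) (fun y => y) with
      | none => t0 | some m => m := by
  have hperm : (PySem.List.sorted l (fun x => x)).Perm l := PySem.List.sorted_perm l (fun x => x) false
  cases hMu : PySem.List.max? (l.filter (fun p => decide (t0 < p) && decide (p < lim))) (fun y => y) with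
  | none =>
    have hfe : l.filter (fun p => decide (t0 < p) && decide (p < lim)) = [] :=
      (PySem.List.max?_eq_none_iff _ _).mp hMu
    simp only []
    rcases gT_cases lim (PySem.List.sorted l (fun x => x)) t0 with h | ⟨hm, hgt, hlt⟩
    · exact h
    · exfalso
      have hl : gT lim (PySem.List.sorted l (fun x => x)) t0 ∈ l := hperm.mem_iff.mp hm
      have : gT lim (PySem.List.sorted l (fun x => x)) t0
          ∈ l.filter (fun p => decide (t0 < p) && decide (p < lim)) :=
        List.mem_filter.mpr ⟨hl, by simp [hgt, hlt]⟩
      rw [hfe] at this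
      simp at this
  | some M =>
    have hMf := PySem.List.max?_mem hMu
    obtain ⟨hMl, hMc⟩ := List.mem_filter.mp hMf
    have hMc' : t0 < M ∧ M < lim := by simpa using hMc
    have hub := PySem.List.max?_isMax hMu
    simp only []
    apply le_antisymm
    · rcases gT_cases lim (PySem.List.sorted l (fun x => x)) t0 with h | ⟨hm, hgt, hlt⟩
      · rw [h]; omega
      · have hl : gT lim (PySem.List.sorted l (fun x => x)) t0 ∈ l := hperm.mem_iff.mp hm
        exact hub _ (List.mem_filter.mpr ⟨hl, by simp [hgt, hlt]⟩)
    · exact gT_ub lim (PySem.List.sorted l (fun x => x)) t0 M (hperm.mem_iff.mpr hMl) hMc'.1 hMc'.2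


-- decimal digit characters of a natural number (Nat.toDigits 10 without fuel)
def decChars (n : Nat) : List Char :=
  if h : n < 10 then [Nat.digitChar n]
  else decChars (n / 10) ++ [Nat.digitChar (n % 10)]
decreasing_by exact Nat.div_lt_self (by omega) (by omega)

theorem decChars_eq (n : Nat) : decChars n =
    if n < 10 then [Nat.digitChar n] else decChars (n / 10) ++ [Nat.digitChar (n % 10)] := by
  rw [decChars]
  split <;> rfl

theorem toDigitsCore_eq_decChars (f : Nat) : ∀ (n : Nat) (acc : List Char), n < f →
    Nat.toDigitsCore 10 f n acc = decChars n ++ acc := by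
  induction f with
  | zero => intro n acc h; omega
  | succ f ih =>
    intro n acc h
    by_cases hn : n < 10
    · have h10 : n / 10 = 0 := Nat.div_eq_of_lt hn
      have hm : n % 10 = n := Nat.mod_eq_of_lt hn
      simp only [Nat.toDigitsCore, h10, if_pos, hm]
      rw [decChars_eq n, if_pos hn]
      simp
    · have h10 : n / 10 ≠ 0 := by omega
      have hlt : n / 10 < f := by
        have := Nat.div_lt_self (show 0 < n by omega) (show 1 < 10 by omega)
        omega
      simp only [Nat.toDigitsCore, h10, if_false]
      rw [ih (n / 10) (Nat.digitChar (n % 10) :: acc) hlt]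
      rw [decChars_eq n, if_neg hn]
      simp

theorem toDigits_eq_decChars (n : Nat) : Nat.toDigits 10 n = decChars n := by
  have := toDigitsCore_eq_decChars (n + 1) n [] (by omega)
  simpa [Nat.toDigits] using this

theorem decChars_ne_nil (n : Nat) : decChars n ≠ [] := by
  rw [decChars_eq]
  split <;> simp

theorem decChars_head (n : Nat) : ∃ k, k < 10 ∧ ∃ r, decChars n = Nat.digitChar k :: r := by
  induction n using Nat.strong_induction_on with
  | _ n ih =>
    by_cases hn : n < 10
    · exact ⟨n, hn, [], by rw [decChars_eq, if_pos hn]⟩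
    · obtain ⟨k, hk, r, hr⟩ := ih (n / 10) (Nat.div_lt_self (by omega) (by omega))
      exact ⟨k, hk, r ++ [Nat.digitChar (n % 10)], by rw [decChars_eq n, if_neg hn, hr]; simp⟩

theorem digitChar_inj10 (a b : Nat) (ha : a < 10) (hb : b < 10)
    (h : Nat.digitChar a = Nat.digitChar b) : a = b := by
  have key : ∀ x y : Fin 10, Nat.digitChar x.val = Nat.digitChar y.val → x = y := by decide
  have := key ⟨a, ha⟩ ⟨b, hb⟩ h
  exact congrArg Fin.val this

theorem digitChar_ne_dash (a : Nat) (ha : a < 10) : Nat.digitChar a ≠ '-' := by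
  have key : ∀ x : Fin 10, Nat.digitChar x.val ≠ '-' := by decide
  exact key ⟨a, ha⟩

theorem decChars_inj (a : Nat) : ∀ b : Nat, decChars a = decChars b → a = b := by
  induction a using Nat.strong_induction_on with
  | _ a ih =>
    intro b h
    by_cases ha : a < 10 <;> by_cases hb : b < 10
    · rw [decChars_eq a, if_pos ha, decChars_eq b, if_pos hb] at h
      exact digitChar_inj10 a b ha hb (by simpa using h)
    · exfalso
      rw [decChars_eq a, if_pos ha, decChars_eq b, if_neg hb] at h
      have hlen := congrArg List.length h
      rcases hq : decChars (b / 10) with _ | ⟨c, cs⟩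
      · exact decChars_ne_nil _ hq
      · rw [hq] at hlen; simp at hlen
    · exfalso
      rw [decChars_eq a, if_neg ha, decChars_eq b, if_pos hb] at h
      have hlen := congrArg List.length h
      rcases hq : decChars (a / 10) with _ | ⟨c, cs⟩
      · exact decChars_ne_nil _ hq
      · rw [hq] at hlen; simp at hlen
    · rw [decChars_eq a, if_neg ha, decChars_eq b, if_neg hb] at h
      rw [← List.concat_eq_append, ← List.concat_eq_append] at h
      obtain ⟨h1, h2⟩ := List.concat_inj.mp h
      have hdiv : a / 10 = b / 10 :=
        ih (a / 10) (Nat.div_lt_self (by omega) (by omega)) (b / 10) h1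
      have hmod : a % 10 = b % 10 :=
        digitChar_inj10 _ _ (Nat.mod_lt _ (by omega)) (Nat.mod_lt _ (by omega)) h2
      omega

theorem toChars_inj (n m : Int) (h : PySem.Int.toChars n = PySem.Int.toChars m) : n = m := by
  unfold PySem.Int.toChars at h
  simp only [toDigits_eq_decChars] at h
  split_ifs at h with h1 h2 h2
  · have := decChars_inj _ _ (List.tail_eq_of_cons_eq h)
    omega
  · exfalso
    obtain ⟨k, hk, r, hr⟩ := decChars_head m.toNat
    rw [hr] at h
    exact digitChar_ne_dash k hk (List.head_eq_of_cons_eq h).symm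
  · exfalso
    obtain ⟨k, hk, r, hr⟩ := decChars_head n.toNat
    rw [hr] at h
    exact digitChar_ne_dash k hk (List.head_eq_of_cons_eq h.symm).symm
  · have := decChars_inj _ _ h
    omega

theorem toStr_inj (n m : Int) (h : PySem.Int.toStr n = PySem.Int.toStr m) : n = m := by
  have := congrArg String.toList h
  rw [PySem.Int.toList_toStr, PySem.Int.toList_toStr] at this
  exact toChars_inj n m this

theorem elev_str_ne (x y : Int) (h : x ≠ y) :
    "ELEVADOR " ++ PySem.Int.toStr x ≠ "ELEVADOR " ++ PySem.Int.toStr y := by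
  intro heq
  exact h (toStr_inj x y ((String.append_right_inj _).mp heq))

-- ===== VERDICT (by name: the statements are the Claim_ definitions above) =====
theorem elevador_spec : Claim_unchanged_elevador := by
  intro t0 lim l _ hD
  show elevador t0 lim l = elevador_alt t0 lim l
  simp only [elevador, elevador_alt]
  rw [splitA]
  set s := PySem.List.sorted l (fun x => x) with hs
  set t := gT lim s t0 with ht
  set d := gD lim s t0 with hd
  have hsP : s.Pairwise (· ≤ ·) := PySem.List.sorted_pairwise l (fun x => x)
  have hperm : s.Perm l := PySem.List.sorted_perm l (fun x => x) false
  have hdP : d.Pairwise (· ≤ ·) := hsP.sublist (gD_sublist lim s t0)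
  have htmp := gT_eq_max t0 lim l
  -- membership characterisation of d
  have hmemd : ∀ v, v ∈ d ↔ v ∈ l ∧ (v ≤ t0 ∨ lim ≤ v ∨ 2 ≤ l.count v) := by
    intro v
    rw [hd, gD_mem lim s hsP t0 v, hperm.mem_iff, hperm.count_eq]
  have hrest_mem : ∀ v, v ∈ l.filter (fun p => !(decide (t0 < p) && decide (p < lim)))
      ↔ v ∈ l ∧ (v ≤ t0 ∨ lim ≤ v) := by
    intro v
    rw [List.mem_filter]
    constructor
    · rintro ⟨h1, h2⟩; refine ⟨h1, ?_⟩; simp at h2; omega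
    · rintro ⟨h1, h2⟩; refine ⟨h1, ?_⟩; simp; omega
  have hrest_sub_d : ∀ v, v ∈ l.filter (fun p => !(decide (t0 < p) && decide (p < lim))) → v ∈ d := by
    intro v hv
    obtain ⟨h1, h2⟩ := (hrest_mem v).mp hv
    exact (hmemd v).mpr ⟨h1, by omega⟩
  have hwin_le_t : ∀ v ∈ l, t0 < v → v < lim → v ≤ t := by
    intro v hv h1 h2
    exact gT_ub lim s t0 v (hperm.mem_iff.mpr hv) h1 h2
  -- a member of d that is not an other-direction request is a duplicated in-window request
  have hdup : ∀ v ∈ d, t0 < v → v < lim → 2 ≤ l.count v := by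
    intro v hv h1 h2
    obtain ⟨_, hc⟩ := (hmemd v).mp hv
    omega
  by_cases hdnil : d = []
  · -- no rejected requests at all: rest is empty too
    have hrnil : l.filter (fun p => !(decide (t0 < p) && decide (p < lim))) = [] := by
      rw [List.eq_nil_iff_forall_not_mem]
      intro v hv
      have := hrest_sub_d v hv
      rw [hdnil] at this
      simp at this
    simp only [List.nil_append]
    rw [hdnil, show PySem.List.sorted ([] : List Int) (fun x => x) true = [] from rfl]
    simp only [List.foldl_nil, hrnil]
    rw [show PySem.List.max? ([] : List Int) (fun y => y) = none from rfl,
        show PySem.List.min? ([] : List Int) (fun y => y) = none from rfl]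
    simp only []
    rw [← htmp, ← ht]
    refine congrArg (fun z => "ELEVADOR " ++ PySem.Int.toStr z) ?_
    ring
  · -- d nonempty: its descending sort is its reverse
    have hdne : d ≠ [] := hdnil
    obtain ⟨y, ys, hrev⟩ : ∃ y ys, d.reverse = y :: ys := by
      rcases h : d.reverse with _ | ⟨y, ys⟩
      · exact absurd (by simpa using congrArg List.reverse h) hdne
      · exact ⟨y, ys, rfl⟩
    have hddP : (y :: ys).Pairwise (fun a b : Int => b ≤ a) := by
      rw [← hrev, List.pairwise_reverse]
      exact hdP
    have hsortrev : PySem.List.sorted d (fun x => x) true = y :: ys := by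
      have h2 : d.Perm (y :: ys) := by rw [← hrev]; exact (List.reverse_perm _).symm
      exact List.Perm.eq_of_pairwise (le := fun a b : Int => b ≤ a)
        (fun a b _ _ h1 h2 => le_antisymm h2 h1)
        (PySem.List.sorted_pairwise_rev _ _) hddP
        ((PySem.List.sorted_perm _ _ true).trans h2)
    have hmemdd : ∀ v, v ∈ y :: ys ↔ v ∈ d := by
      intro v; rw [← hrev, List.mem_reverse]
    set md := (y :: ys).getLast (List.cons_ne_nil y ys) with hmd
    have hmd_mem : md ∈ d := (hmemdd md).mp (List.getLast_mem _)
    have hy_mem : y ∈ d := (hmemdd y).mp List.mem_cons_self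
    have hmd_min : ∀ v ∈ d, md ≤ v := fun v hv => descLast_le y ys hddP v ((hmemdd v).mpr hv)
    have hy_max : ∀ v ∈ d, v ≤ y := by
      intro v hv
      rcases List.mem_cons.mp ((hmemdd v).mpr hv) with rfl | hv'
      · exact le_refl v
      · exact (List.pairwise_cons.mp hddP).1 v hv'
    simp only [List.nil_append]
    rw [hsortrev, descFold y ys _ _ hddP, ← hmd]
    by_cases hrnil : l.filter (fun p => !(decide (t0 < p) && decide (p < lim))) = []
    · -- rest empty: every rejected request is a duplicated in-window value equal to t
      have hall_t : ∀ v ∈ d, v = t := by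
        intro v hv
        obtain ⟨hvl, _⟩ := (hmemd v).mp hv
        have hnr : ¬ (v ≤ t0 ∨ lim ≤ v) := by
          intro hvr
          have : v ∈ l.filter (fun p => !(decide (t0 < p) && decide (p < lim))) :=
            (hrest_mem v).mpr ⟨hvl, hvr⟩
          rw [hrnil] at this
          simp at this
        have h1 : t0 < v := by omega
        have h2 : v < lim := by omega
        have hle : v ≤ t := hwin_le_t v hvl h1 h2
        by_contra hne
        have hvt : v < t := lt_of_le_of_ne hle hne
        -- t itself is an in-window element of l
        have htl : t ∈ l ∧ t0 < t ∧ t < lim := by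
          rcases gT_cases lim s t0 with h | ⟨hm, hgt, hlt⟩
          · rw [← ht] at h; omega
          · rw [← ht] at hm hgt hlt; exact ⟨hperm.mem_iff.mp hm, hgt, hlt⟩
        exact hD ⟨v, hvl, h1, h2, hdup v hv h1 h2,
          fun e he => by
            by_cases hw : t0 < e ∧ e < lim
            · exact Or.inl hw
            · exfalso
              have : e ∈ l.filter (fun p => !(decide (t0 < p) && decide (p < lim))) :=
                (hrest_mem e).mpr ⟨he, by omega⟩
              rw [hrnil] at this; simp at this,
          Or.inr ⟨t, htl.1, htl.2.1, htl.2.2, hvt⟩⟩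
      have hyt : y = t := hall_t y hy_mem
      have hmdt : md = t := hall_t md hmd_mem
      rw [hrnil, show PySem.List.max? ([] : List Int) (fun y => y) = none from rfl,
          show PySem.List.min? ([] : List Int) (fun y => y) = none from rfl]
      simp only []
      rw [← htmp, ← ht, hyt, hmdt]
      refine congrArg (fun z => "ELEVADOR " ++ PySem.Int.toStr z) ?_
      simp only [sub_self, abs_zero]
      ring
    · -- rest nonempty
      set rest := l.filter (fun p => !(decide (t0 < p) && decide (p < lim))) with hrst
      have hrne : rest ≠ [] := hrnil
      obtain ⟨ME, hME⟩ : ∃ M, PySem.List.max? rest (fun y => y) = some M := by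
        cases h : PySem.List.max? rest (fun y => y) with
        | none => exact absurd ((PySem.List.max?_eq_none_iff _ _).mp h) hrne
        | some M => exact ⟨M, rfl⟩
      obtain ⟨mE, hmE⟩ : ∃ m, PySem.List.min? rest (fun y => y) = some m := by
        cases h : PySem.List.min? rest (fun y => y) with
        | none => exact absurd ((PySem.List.min?_eq_none_iff _ _).mp h) hrne
        | some m => exact ⟨m, rfl⟩
      rw [hME, hmE]
      simp only []
      -- min of d equals min of rest
      have hmE_d : mE ∈ d := hrest_sub_d mE (PySem.List.min?_mem hmE)
      have hME_d : ME ∈ d := hrest_sub_d ME (PySem.List.max?_mem hME)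
      have hmin_eq : md = mE := by
        apply le_antisymm (hmd_min mE hmE_d)
        -- md ∈ d: either an other-direction request or a duplicated in-window one
        obtain ⟨hmdl, _⟩ := (hmemd md).mp hmd_mem
        by_cases hw : t0 < md ∧ md < lim
        · -- duplicated in-window: ¬D forces some other-direction request ≤ md
          by_contra hlt
          push Not at hlt
          exact hD ⟨md, hmdl, hw.1, hw.2, hdup md hmd_mem hw.1 hw.2,
            fun e he => by
              by_cases hew : t0 < e ∧ e < lim
              · exact Or.inl hew
              · right
                have : e ∈ rest := (hrest_mem e).mpr ⟨he, by omega⟩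
                have := PySem.List.min?_isMin hmE e this
                omega,
            Or.inl ⟨mE, (List.mem_filter.mp (PySem.List.min?_mem hmE)).1, by
              obtain ⟨-, hq⟩ := (hrest_mem mE).mp (PySem.List.min?_mem hmE); omega⟩⟩
        · have : md ∈ rest := (hrest_mem md).mpr ⟨hmdl, by omega⟩
          exact PySem.List.min?_isMin hmE md this
      -- totals agree
      rw [← htmp, ← ht, hmin_eq]
      refine congrArg (fun z => "ELEVADOR " ++ PySem.Int.toStr z) ?_
      have hMEy : ME ≤ y := hy_max ME hME_d
      by_cases hyME : y = ME
      · rw [hyME]; ring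
      · -- y is a duplicated in-window request, so ME < y ≤ t
        obtain ⟨hyl, _⟩ := (hmemd y).mp hy_mem
        have hyw : t0 < y ∧ y < lim := by
          by_contra hw
          have : y ∈ rest := (hrest_mem y).mpr ⟨hyl, by omega⟩
          have := PySem.List.max?_isMax hME y this
          omega
        have hy_t : y ≤ t := hwin_le_t y hyl hyw.1 hyw.2
        have hME_t : ME < t := by omega
        rw [abs_of_nonpos (by omega : y - t ≤ 0), abs_of_nonpos (by omega : ME - t ≤ 0)]
        ring

theorem elevador_changed : Claim_changed_elevador := by
  unfold Claim_changed_elevador; decide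

theorem elevador_tight : Claim_exact_elevador := by
  intro t0 lim l _ hD
  obtain ⟨v, hvl, hv1, hv2, hvc, hall, hex⟩ := hD
  simp only [elevador, elevador_alt]
  rw [splitA]
  set s := PySem.List.sorted l (fun x => x) with hs
  set t := gT lim s t0 with ht
  set d := gD lim s t0 with hd
  have hsP : s.Pairwise (· ≤ ·) := PySem.List.sorted_pairwise l (fun x => x)
  have hperm : s.Perm l := PySem.List.sorted_perm l (fun x => x) false
  have hdP : d.Pairwise (· ≤ ·) := hsP.sublist (gD_sublist lim s t0)
  have htmp := gT_eq_max t0 lim l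
  have hmemd : ∀ u, u ∈ d ↔ u ∈ l ∧ (u ≤ t0 ∨ lim ≤ u ∨ 2 ≤ l.count u) := by
    intro u
    rw [hd, gD_mem lim s hsP t0 u, hperm.mem_iff, hperm.count_eq]
  have hrest_mem : ∀ u, u ∈ l.filter (fun p => !(decide (t0 < p) && decide (p < lim)))
      ↔ u ∈ l ∧ (u ≤ t0 ∨ lim ≤ u) := by
    intro u
    rw [List.mem_filter]
    constructor
    · rintro ⟨h1, h2⟩; refine ⟨h1, ?_⟩; simp at h2; omega
    · rintro ⟨h1, h2⟩; refine ⟨h1, ?_⟩; simp; omega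
  have hwin_le_t : ∀ u ∈ l, t0 < u → u < lim → u ≤ t := by
    intro u hu h1 h2
    exact gT_ub lim s t0 u (hperm.mem_iff.mpr hu) h1 h2
  have hv_d : v ∈ d := (hmemd v).mpr ⟨hvl, Or.inr (Or.inr hvc)⟩
  have hdne : d ≠ [] := by
    intro hnil
    rw [hnil] at hv_d
    simp at hv_d
  obtain ⟨y, ys, hrev⟩ : ∃ y ys, d.reverse = y :: ys := by
    rcases h : d.reverse with _ | ⟨y, ys⟩
    · exact absurd (by simpa using congrArg List.reverse h) hdne
    · exact ⟨y, ys, rfl⟩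
  have hddP : (y :: ys).Pairwise (fun a b : Int => b ≤ a) := by
    rw [← hrev, List.pairwise_reverse]
    exact hdP
  have hsortrev : PySem.List.sorted d (fun x => x) true = y :: ys := by
    have h2 : d.Perm (y :: ys) := by rw [← hrev]; exact (List.reverse_perm _).symm
    exact List.Perm.eq_of_pairwise (le := fun a b : Int => b ≤ a)
      (fun a b _ _ h1 h2 => le_antisymm h2 h1)
      (PySem.List.sorted_pairwise_rev _ _) hddP
      ((PySem.List.sorted_perm _ _ true).trans h2)
  have hmemdd : ∀ u, u ∈ y :: ys ↔ u ∈ d := by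
    intro u; rw [← hrev, List.mem_reverse]
  set md := (y :: ys).getLast (List.cons_ne_nil y ys) with hmd
  have hy_mem : y ∈ d := (hmemdd y).mp List.mem_cons_self
  have hmd_min : ∀ u ∈ d, md ≤ u := fun u hu => descLast_le y ys hddP u ((hmemdd u).mpr hu)
  have hy_max : ∀ u ∈ d, u ≤ y := by
    intro u hu
    rcases List.mem_cons.mp ((hmemdd u).mpr hu) with rfl | hu'
    · exact le_refl u
    · exact (List.pairwise_cons.mp hddP).1 u hu'
  have hmdv : md ≤ v := hmd_min v hv_d
  simp only [List.nil_append]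
  rw [hsortrev, descFold y ys _ _ hddP, ← hmd]
  have hyl : y ∈ l := ((hmemd y).mp hy_mem).1
  by_cases hrnil : l.filter (fun p => !(decide (t0 < p) && decide (p < lim))) = []
  · -- every request is in-window; the duplicate forces a strictly positive back-sweep in A
    have hvt : v < t := by
      rcases hex with ⟨e, he, hew⟩ | ⟨w, hwl, hw1, hw2, hvw⟩
      · exfalso
        have : e ∈ l.filter (fun p => !(decide (t0 < p) && decide (p < lim))) :=
          (hrest_mem e).mpr ⟨he, by omega⟩
        rw [hrnil] at this
        simp at this
      · have := hwin_le_t w hwl hw1 hw2; omega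
    have hyw : t0 < y ∧ y < lim := by
      by_contra hw
      have : y ∈ l.filter (fun p => !(decide (t0 < p) && decide (p < lim))) :=
        (hrest_mem y).mpr ⟨hyl, by omega⟩
      rw [hrnil] at this
      simp at this
    have hyt : y ≤ t := hwin_le_t y hyl hyw.1 hyw.2
    rw [hrnil, show PySem.List.max? ([] : List Int) (fun y => y) = none from rfl,
        show PySem.List.min? ([] : List Int) (fun y => y) = none from rfl]
    simp only []
    rw [← htmp, ← ht]
    apply elev_str_ne
    clear_value s t d md
    rw [abs_of_nonpos (by omega : y - t ≤ 0)]
    intro heq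
    linarith
  · have hrne : l.filter (fun p => !(decide (t0 < p) && decide (p < lim))) ≠ [] := hrnil
    obtain ⟨ME, hME⟩ : ∃ M, PySem.List.max? (l.filter (fun p => !(decide (t0 < p) && decide (p < lim)))) (fun y => y) = some M := by
      cases h : PySem.List.max? (l.filter (fun p => !(decide (t0 < p) && decide (p < lim)))) (fun y => y) with
      | none => exact absurd ((PySem.List.max?_eq_none_iff _ _).mp h) hrne
      | some M => exact ⟨M, rfl⟩
    obtain ⟨mE, hmE⟩ : ∃ m, PySem.List.min? (l.filter (fun p => !(decide (t0 < p) && decide (p < lim)))) (fun y => y) = some m := by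
      cases h : PySem.List.min? (l.filter (fun p => !(decide (t0 < p) && decide (p < lim)))) (fun y => y) with
      | none => exact absurd ((PySem.List.min?_eq_none_iff _ _).mp h) hrne
      | some m => exact ⟨m, rfl⟩
    rw [hME, hmE]
    simp only []
    have hvmE : v < mE := by
      obtain ⟨hml, hmw⟩ := (hrest_mem mE).mp (PySem.List.min?_mem hmE)
      rcases hall mE hml with hw | hlt
      · omega
      · exact hlt
    have hME_d : ME ∈ d := by
      have hm := PySem.List.max?_mem hME
      obtain ⟨hml, hmw⟩ := (hrest_mem ME).mp hm
      exact (hmemd ME).mpr ⟨hml, by omega⟩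
    have hMEy : ME ≤ y := hy_max ME hME_d
    rw [← htmp, ← ht]
    apply elev_str_ne
    clear_value s t d md
    by_cases hyME : y = ME
    · subst hyME
      intro heq
      linarith
    · have hMEy' : ME < y := lt_of_le_of_ne hMEy (Ne.symm hyME)
      have hyw : t0 < y ∧ y < lim := by
        by_contra hw
        have : y ∈ l.filter (fun p => !(decide (t0 < p) && decide (p < lim))) :=
          (hrest_mem y).mpr ⟨hyl, by omega⟩
        have := PySem.List.max?_isMax hME y this
        omega
      have hyt : y ≤ t := hwin_le_t y hyl hyw.1 hyw.2
      rw [abs_of_nonpos (by omega : y - t ≤ 0), abs_of_nonpos (by omega : ME - t ≤ 0)]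
      intro heq
      linarith
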